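-- pv_equiv track=rewrite | github.com/david1234012/leetcode_cli | src/utils.py | smart_wrap_title
-- ===== SOURCE A (Python) =====
-- def truncate_with_ellipsis(text: str, max_width: int) -> str:
--     """Truncate text with ellipsis if it's too long.
--
--     Args:
--         text: Text to truncate
--         max_width: Maximum width allowed
--
--     Returns:
--         Truncated text with ellipsis if needed
--     """
--     if len(text) <= max_width:
--         return text
--
--     if max_width <= 3:
--         return "..."[:max_width]
--
--     return text[:max_width - 3] + "..."
--
-- def smart_wrap_title(title: str, max_width: int, preserve_words: bool = True) -> str:
--     """Smart title wrapping that tries to preserve word boundaries.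
--
--     Args:
--         title: Title to wrap
--         max_width: Maximum width for the title
--         preserve_words: Whether to try to preserve word boundaries
--
--     Returns:
--         Wrapped or truncated title
--     """
--     if len(title) <= max_width:
--         return title
--
--     if not preserve_words:
--         return truncate_with_ellipsis(title, max_width)
--
--     # Try to find a good break point
--     words = title.split()
--     result = ""
--
--     for word in words:
--         test_result = result + (" " if result else "") + word
--         if len(test_result) <= max_width - 3:  # Reserve space for ellipsis
--             result = test_result
--         else:
--             break
--
--     if result and len(result) < len(title):
--         return result + "..."
--     else:
--         # Fallback to character truncation
--         return truncate_with_ellipsis(title, max_width)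
-- ===== SOURCE B (Python) =====
-- def truncate_with_ellipsis(text: str, max_width: int) -> str:
--     if len(text) <= max_width:
--         return text
--     if max_width <= 3:
--         return "..."[:max_width]
--     return text[:max_width - 3] + "..."
--
--
-- def smart_wrap_title(title: str, max_width: int, preserve_words: bool = True) -> str:
--     if len(title) <= max_width:
--         return title
--     if not preserve_words:
--         return truncate_with_ellipsis(title, max_width)
--     # Cumulative joined lengths: pref[i] = len(" ".join(words[:i+1]))
--     words = title.split()
--     pref = []
--     total = -1
--     for w in words:
--         total += 1 + len(w)
--         pref.append(total)
--     # Largest k with len(" ".join(words[:k])) <= max_width - 3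
--     # (pref is strictly increasing, so counting suffices)
--     k = sum(1 for p in pref if p <= max_width - 3)
--     result = " ".join(words[:k])
--     if result and len(result) < len(title):
--         return result + "..."
--     return truncate_with_ellipsis(title, max_width)
-- ===== Notes on version B (the rewrite author's own statement) =====
-- stated objective: alternative
-- what changed: Instead of growing the result string word by word inside the loop (repeated string concatenation) and breaking, B computes the list of cumulative joined lengths once, counts how many prefixes fit in max_width-3 (they are strictly increasing), and joins that many words in one ' '.join.
import Mathlib
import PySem

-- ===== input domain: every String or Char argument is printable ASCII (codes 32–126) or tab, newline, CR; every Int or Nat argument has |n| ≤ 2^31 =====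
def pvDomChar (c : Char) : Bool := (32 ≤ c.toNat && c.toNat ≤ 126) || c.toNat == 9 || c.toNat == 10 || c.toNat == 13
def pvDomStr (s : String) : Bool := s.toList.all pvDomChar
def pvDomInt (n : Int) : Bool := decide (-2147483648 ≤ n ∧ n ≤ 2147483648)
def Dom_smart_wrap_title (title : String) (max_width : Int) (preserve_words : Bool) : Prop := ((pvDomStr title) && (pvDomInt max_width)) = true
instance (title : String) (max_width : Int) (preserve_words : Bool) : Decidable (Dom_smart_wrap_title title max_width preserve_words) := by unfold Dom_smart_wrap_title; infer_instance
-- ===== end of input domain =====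

-- B replaces A's grow-string-and-break loop by counting, over the once-computed list of
-- cumulative joined word lengths, how many prefixes fit, then joining that many words at once.

-- ===== PORT A =====
-- shared module helper (identical in Source A and Source B)
def truncate_with_ellipsis (text : String) (max_width : Int) : String :=
  if PySem.Str.len text ≤ max_width then text
  else if max_width ≤ 3 then PySem.Str.slice "..." none (some max_width)
  else PySem.Str.slice text none (some (max_width - 3)) ++ "..."

-- A's for-loop with break: grow `result`, stop at the first word that does not fit
def pvWrapLoop (words : List String) (result : String) (max_width : Int) : String :=
  match words with
  | [] => result
  | w :: rest =>
      let test := result ++ (if result = "" then "" else " ") ++ w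
      if PySem.Str.len test ≤ max_width - 3 then pvWrapLoop rest test max_width
      else result

def smart_wrap_title (title : String) (max_width : Int) (preserve_words : Bool) : String :=
  if PySem.Str.len title ≤ max_width then title
  else if preserve_words = false then truncate_with_ellipsis title max_width
  else
    let words := PySem.Str.split₀ title
    let result := pvWrapLoop words "" max_width
    if result ≠ "" ∧ PySem.Str.len result < PySem.Str.len title then result ++ "..."
    else truncate_with_ellipsis title max_width

-- ===== PORT B =====
-- Source B's accumulation loop: pref[i] = len(" ".join(words[:i+1])), built from total = -1
def pvPrefLens (words : List String) (total : Int) : List Int :=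
  match words with
  | [] => []
  | w :: rest =>
      let t := total + 1 + PySem.Str.len w
      t :: pvPrefLens rest t

def smart_wrap_title_alt (title : String) (max_width : Int) (preserve_words : Bool) : String :=
  if PySem.Str.len title ≤ max_width then title
  else if preserve_words = false then truncate_with_ellipsis title max_width
  else
    let words := PySem.Str.split₀ title
    let pref := pvPrefLens words (-1)
    -- k = sum(1 for p in pref if p <= max_width - 3)
    let k := (pref.filter (fun p => decide (p ≤ max_width - 3))).length
    -- words[:k] with k ≥ 0 a Nat is exactly List.take k
    let result := PySem.Str.join " " (words.take k)
    if result ≠ "" ∧ PySem.Str.len result < PySem.Str.len title then result ++ "..."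
    else truncate_with_ellipsis title max_width

-- ===== PRECONDITION & SPEC =====
def Spec_smart_wrap_title (title : String) (max_width : Int) (preserve_words : Bool) (out : String) : Prop := out = smart_wrap_title_alt title max_width preserve_words
instance (title : String) (max_width : Int) (preserve_words : Bool) (out : String) : Decidable (Spec_smart_wrap_title title max_width preserve_words out) := by unfold Spec_smart_wrap_title; infer_instance

-- ===== CLAIM (what is proved, stated in full; the proofs are below) =====
def Claim_equal_smart_wrap_title : Prop := ∀ (title : String) (max_width : Int) (preserve_words : Bool), Dom_smart_wrap_title title max_width preserve_words → Spec_smart_wrap_title title max_width preserve_words (smart_wrap_title title max_width preserve_words)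

-- ===== LEMMAS AND PROOFS =====

-- reference count: number of words A's loop accepts, threaded by current joined length
def pvCnt (words : List String) (t : Int) (max_width : Int) : Nat :=
  match words with
  | [] => 0
  | w :: rest =>
      if t + 1 + PySem.Str.len w ≤ max_width - 3 then pvCnt rest (t + 1 + PySem.Str.len w) max_width + 1
      else 0

theorem mem_pvPrefLens_gt (words : List String) : ∀ (t x : Int), x ∈ pvPrefLens words t → t < x := by
  induction words with
  | nil => intro t x h; simp [pvPrefLens] at h
  | cons w rest ih =>
      intro t x h
      simp only [pvPrefLens, List.mem_cons] at h
      have hlen : (0:Int) ≤ PySem.Str.len w := by simp [PySem.Str.len]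
      rcases h with h | h
      · omega
      · have := ih _ _ h; omega

theorem filter_len_eq_cnt (words : List String) : ∀ (t max_width : Int),
    ((pvPrefLens words t).filter (fun p => decide (p ≤ max_width - 3))).length = pvCnt words t max_width := by
  induction words with
  | nil => intro t mw; simp [pvPrefLens, pvCnt]
  | cons w rest ih =>
      intro t mw
      simp only [pvPrefLens, pvCnt, List.filter_cons, PySem.Str.len_eq]
      by_cases h : t + 1 + (w.length : Int) ≤ mw - 3
      · simp [h, ih]
      · have hnil : List.filter (fun p => decide (p ≤ mw - 3)) (pvPrefLens rest (t + 1 + (w.length : Int))) = [] := by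
          rw [List.filter_eq_nil_iff]
          intro x hx
          have h2 := mem_pvPrefLens_gt rest _ _ hx
          simp only [PySem.Str.len_eq] at h2
          simp only [decide_eq_true_eq]
          omega
        simp [h, hnil]

theorem ofList_ne_empty {l : List Char} (h : l ≠ []) : String.ofList l ≠ "" := by
  intro hc
  apply h
  have := congrArg String.toList hc
  simpa using this

theorem split₀_go_ne_nil (s : List Char) : ∀ (cur : List Char) (acc : List (List Char)),
    (∀ x ∈ acc, x ≠ []) → ∀ x ∈ PySem.Chars.split₀.go s cur acc, x ≠ [] := by
  induction s with
  | nil =>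
      intro cur acc hacc x hx
      unfold PySem.Chars.split₀.go at hx
      by_cases hc : cur.isEmpty
      · simp [hc] at hx; exact hacc _ (by simpa using hx)
      · simp [hc] at hx
        rcases hx with hx | hx
        · exact hacc _ hx
        · subst hx; simpa [List.isEmpty_iff] using hc
  | cons c rest ih =>
      intro cur acc hacc x hx
      unfold PySem.Chars.split₀.go at hx
      by_cases hs : PySem.Chars.isspace c
      · by_cases hc : cur.isEmpty
        · simp [hs, hc] at hx; exact ih [] acc hacc x hx
        · simp [hs, hc] at hx
          have hacc' : ∀ y ∈ cur.reverse :: acc, y ≠ [] := by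
            intro y hy
            rcases List.mem_cons.mp hy with hy | hy
            · subst hy; simpa [List.isEmpty_iff] using hc
            · exact hacc _ hy
          exact ih [] (cur.reverse :: acc) hacc' x hx
      · simp [hs] at hx
        exact ih (c :: cur) acc hacc x hx

theorem split₀_ne_empty (s : String) : ∀ w ∈ PySem.Str.split₀ s, w ≠ "" := by
  intro w hw
  simp only [PySem.Str.split₀, List.mem_map] at hw
  rcases hw with ⟨l, hl, rfl⟩
  have : l ≠ [] := split₀_go_ne_nil s.toList [] [] (by simp) l (by simpa [PySem.Chars.split₀] using hl)
  exact ofList_ne_empty this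

theorem join_singleton (r : String) : PySem.Str.join " " [r] = r := by
  simp [PySem.Str.join, PySem.Chars.join, List.intercalate]

theorem join_merge (sep a b : String) (l : List String) :
    PySem.Str.join sep ((a ++ sep ++ b) :: l) = PySem.Str.join sep (a :: b :: l) := by
  simp only [PySem.Str.join, PySem.Chars.join, List.map_cons]
  cases l with
  | nil => simp [List.intercalate]
  | cons c l' => simp [List.intercalate, List.intersperse]

theorem ne_empty_of_append_space (r w : String) : r ++ " " ++ w ≠ "" := by
  intro h
  have := congrArg String.toList h
  simp at this

theorem loop_eq_join (words : List String) : ∀ (r : String) (max_width : Int), r ≠ "" →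
    pvWrapLoop words r max_width =
      PySem.Str.join " " (r :: words.take (pvCnt words (PySem.Str.len r) max_width)) := by
  induction words with
  | nil => intro r mw _; simp [pvWrapLoop, pvCnt, join_singleton]
  | cons w rest ih =>
      intro r mw hr
      simp only [pvWrapLoop, pvCnt, if_neg hr]
      have hlen : PySem.Str.len (r ++ " " ++ w) = PySem.Str.len r + 1 + PySem.Str.len w := by
        simp only [PySem.Str.len_append]
        have : PySem.Str.len " " = 1 := by decide
        omega
      by_cases h : PySem.Str.len r + 1 + PySem.Str.len w ≤ mw - 3
      · rw [if_pos (by rw [hlen]; exact h), if_pos h]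
        rw [ih (r ++ " " ++ w) mw (ne_empty_of_append_space r w), hlen]
        rw [List.take_succ_cons, join_merge]
      · rw [if_neg (by rw [hlen]; exact h), if_neg h]
        simp [join_singleton]

theorem loop_eq_join_nil (words : List String) (max_width : Int) (hw : ∀ w ∈ words, w ≠ "") :
    pvWrapLoop words "" max_width =
      PySem.Str.join " " (words.take (pvCnt words (-1) max_width)) := by
  cases words with
  | nil => simp [pvWrapLoop, pvCnt, PySem.Str.join, PySem.Chars.join, List.intercalate]
  | cons w rest =>
      have hw0 : w ≠ "" := hw w (by simp)
      simp only [pvWrapLoop, pvCnt]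
      rw [show (("" : String) ++ (if True then "" else " ")) ++ w = w from by simp]
      have harith : (-1 : Int) + 1 + PySem.Str.len w = PySem.Str.len w := by omega
      rw [harith]
      by_cases h : PySem.Str.len w ≤ max_width - 3
      · rw [if_pos h, if_pos h, loop_eq_join rest w max_width hw0, List.take_succ_cons]
      · rw [if_neg h, if_neg h]
        simp [PySem.Str.join, PySem.Chars.join, List.intercalate]

-- ===== VERDICT (by name: the statement is the Claim_ definition above) =====
theorem smart_wrap_title_spec : Claim_equal_smart_wrap_title := by
  intro title max_width preserve_words _
  unfold Spec_smart_wrap_title smart_wrap_title smart_wrap_title_alt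
  by_cases h1 : PySem.Str.len title ≤ max_width
  · rw [if_pos h1, if_pos h1]
  · rw [if_neg h1, if_neg h1]
    by_cases h2 : preserve_words = false
    · rw [if_pos h2, if_pos h2]
    · rw [if_neg h2, if_neg h2]
      dsimp only
      rw [loop_eq_join_nil (PySem.Str.split₀ title) max_width (split₀_ne_empty title),
          filter_len_eq_cnt]
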